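-- pv_equiv track=rewrite | github.com/painh/HoneyCommander | src/commander/views/file_list/file_list_search.py | _fuzzy_score
-- ===== SOURCE A (Python) =====
-- def _fuzzy_score(pattern: str, text: str) -> int:
--     """Calculate fuzzy match score. Higher is better."""
--     if not pattern:
--         return 0
--
--     # Exact prefix match gets highest score
--     if text.startswith(pattern):
--         return 1000 + len(pattern)
--
--     # Check if all characters appear in order
--     pattern_idx = 0
--     score = 0
--     consecutive = 0
--
--     for i, char in enumerate(text):
--         if pattern_idx < len(pattern) and char == pattern[pattern_idx]:
--             pattern_idx += 1
--             consecutive += 1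
--             # Bonus for consecutive matches
--             score += consecutive * 10
--             # Bonus for match at start
--             if i == 0:
--                 score += 50
--         else:
--             consecutive = 0
--
--     # All pattern characters must be found
--     if pattern_idx < len(pattern):
--         return 0
--
--     return score
-- ===== SOURCE B (Python) =====
-- def _fuzzy_score(pattern: str, text: str) -> int:
--     if not pattern:
--         return 0
--     if text.startswith(pattern):
--         return 1000 + len(pattern)
--     # Greedy pass: collect the text indices of the matched pattern chars.
--     hits = []
--     pi = 0
--     for i, ch in enumerate(text):
--         if pi < len(pattern) and ch == pattern[pi]:
--             hits.append(i)
--             pi += 1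
--     if pi < len(pattern):
--         return 0
--     # Scoring pass over the hit indices.
--     score = 0
--     consec = 0
--     prev = None
--     for h in hits:
--         consec = consec + 1 if prev is not None and h == prev + 1 else 1
--         score += consec * 10
--         prev = h
--     if 0 in hits:
--         score += 50
--     return score
-- ===== Notes on version B (the rewrite author's own statement) =====
-- stated objective: alternative
-- what changed: A computes the score inside the single character-scan with live consecutive/bonus bookkeeping; B first collects the matched text indices in a greedy pass, then derives the score in a separate pass over that hit list (consecutive runs from index adjacency, start bonus from 0 being a hit).
import Mathlib
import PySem

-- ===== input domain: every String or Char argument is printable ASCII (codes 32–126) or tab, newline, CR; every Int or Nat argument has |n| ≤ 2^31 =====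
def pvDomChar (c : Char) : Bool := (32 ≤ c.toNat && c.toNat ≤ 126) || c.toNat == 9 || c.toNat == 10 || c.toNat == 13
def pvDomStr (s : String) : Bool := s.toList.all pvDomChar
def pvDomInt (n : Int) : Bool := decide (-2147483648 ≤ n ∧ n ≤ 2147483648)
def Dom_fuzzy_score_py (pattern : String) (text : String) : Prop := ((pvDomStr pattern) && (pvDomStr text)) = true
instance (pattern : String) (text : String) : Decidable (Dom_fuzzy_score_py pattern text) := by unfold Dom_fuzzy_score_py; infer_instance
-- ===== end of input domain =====

-- B replaces A's single scoring loop by a greedy hit-index collection pass followed by a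
-- separate scoring pass over the hit list (alternative decomposition, same cost).

-- ===== PORT A =====
-- A's loop body: state = (pattern_idx, score, consecutive); one enumerate step.
def fsStepA (p : List Char) (s : Nat × Int × Int) (ic : Int × Char) : Nat × Int × Int :=
  if p[s.1]? = some ic.2 then
    (s.1 + 1, s.2.1 + (s.2.2 + 1) * 10 + (if ic.1 = 0 then 50 else 0), s.2.2 + 1)
  else (s.1, s.2.1, 0)

def fuzzy_score_py (pattern : String) (text : String) : Int :=
  let p := pattern.toList
  if p = [] then 0
  else if PySem.Str.startswith text pattern then 1000 + (p.length : Int)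
  else
    let st := (PySem.List.enumerate text.toList 0).foldl (fsStepA p) (0, 0, 0)
    if st.1 < p.length then 0 else st.2.1

-- ===== PORT B =====
-- B's first loop: state = (pattern_idx, hits); collect matched text indices.
def fsStepC (p : List Char) (s : Nat × List Int) (ic : Int × Char) : Nat × List Int :=
  if p[s.1]? = some ic.2 then (s.1 + 1, s.2 ++ [ic.1]) else s

-- B's second loop: state = (score, consec, prev); score one hit index.
def fsStepS (s : Int × Int × Option Int) (h : Int) : Int × Int × Option Int :=
  let consec := match s.2.2 with
    | some q => if h = q + 1 then s.2.1 + 1 else 1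
    | none => 1
  (s.1 + consec * 10, consec, some h)

def fuzzy_score_py_alt (pattern : String) (text : String) : Int :=
  let p := pattern.toList
  if p = [] then 0
  else if PySem.Str.startswith text pattern then 1000 + (p.length : Int)
  else
    let c := (PySem.List.enumerate text.toList 0).foldl (fsStepC p) (0, [])
    if c.1 < p.length then 0
    else
      let sc := c.2.foldl fsStepS (0, 0, none)
      sc.1 + (if (0 : Int) ∈ c.2 then 50 else 0)

-- ===== PRECONDITION & SPEC =====
def Spec_fuzzy_score_py (pattern : String) (text : String) (out : Int) : Prop := out = fuzzy_score_py_alt pattern text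
instance (pattern : String) (text : String) (out : Int) : Decidable (Spec_fuzzy_score_py pattern text out) := by unfold Spec_fuzzy_score_py; infer_instance

-- ===== CLAIM (what is proved, stated in full; the proofs are below) =====
def Claim_equal_fuzzy_score_py : Prop := ∀ (pattern : String) (text : String), Dom_fuzzy_score_py pattern text → Spec_fuzzy_score_py pattern text (fuzzy_score_py pattern text)

-- ===== LEMMAS AND PROOFS =====

-- the +50 start bonus B adds after its scoring pass
def fsBonus (hits : List Int) : Int := if (0 : Int) ∈ hits then 50 else 0

-- A's 'consecutive' value reconstructed from B's scoring state at text index n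
def fsConsecOf (s : Int × Int × Option Int) (n : Int) : Int :=
  match s.2.2 with
  | some q => if q + 1 = n then s.2.1 else 0
  | none => 0

lemma fsStepS_prev (hits : List Int) (a : Int × Int × Option Int) :
    (List.foldl fsStepS a hits).2.2 = hits.getLast?.or a.2.2 := by
  induction hits generalizing a with
  | nil => simp
  | cons h t ih =>
    simp only [List.foldl_cons, ih]
    cases t with
    | nil => simp [fsStepS]
    | cons x xs =>
      rw [List.getLast?_cons_cons]
      cases hg : (x :: xs).getLast? with
      | none => simp at hg
      | some r => simp

lemma fs_main (p : List Char) (cs : List Char) : ∀ (n : Int) (pi : Nat) (hits : List Int),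
    (∀ x ∈ hits, x < n) →
    (List.foldl (fsStepA p)
        (pi, (List.foldl fsStepS (0, 0, none) hits).1 + fsBonus hits,
          fsConsecOf (List.foldl fsStepS (0, 0, none) hits) n)
        (PySem.List.enumerate cs n)).1
      = (List.foldl (fsStepC p) (pi, hits) (PySem.List.enumerate cs n)).1
    ∧ (List.foldl (fsStepA p)
        (pi, (List.foldl fsStepS (0, 0, none) hits).1 + fsBonus hits,
          fsConsecOf (List.foldl fsStepS (0, 0, none) hits) n)
        (PySem.List.enumerate cs n)).2.1
      = (List.foldl fsStepS (0, 0, none)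
          (List.foldl (fsStepC p) (pi, hits) (PySem.List.enumerate cs n)).2).1
        + fsBonus (List.foldl (fsStepC p) (pi, hits) (PySem.List.enumerate cs n)).2 := by
  induction cs with
  | nil => intro n pi hits _; simp [PySem.List.enumerate_nil]
  | cons c cs ih =>
    intro n pi hits hlt
    rw [PySem.List.enumerate_cons]
    simp only [List.foldl_cons]
    set S := List.foldl fsStepS (0, 0, none) hits with hS
    by_cases hm : p[pi]? = some c
    · -- match: hit n is appended
      have hS' : List.foldl fsStepS ((0 : Int), (0 : Int), (none : Option Int)) (hits ++ [n])
          = fsStepS S n := by rw [List.foldl_append, ← hS]; rfl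
      have hconsec : (fsStepS S n).2.1 = fsConsecOf S n + 1 := by
        simp only [fsStepS, fsConsecOf]
        cases hp : S.2.2 with
        | none => simp
        | some q =>
          by_cases hq : n = q + 1
          · simp [hq]
          · have : ¬ q + 1 = n := fun h => hq h.symm
            simp [hq, this]
      have hbonus : fsBonus (hits ++ [n]) = fsBonus hits + (if n = 0 then 50 else 0) := by
        simp only [fsBonus, List.mem_append, List.mem_singleton]
        by_cases hn : n = 0
        · have h0 : (0 : Int) ∉ hits := fun h => by have := hlt 0 h; omega
          simp [hn, h0]
        · have : ¬ (0 : Int) = n := fun h => hn h.symm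
          simp [this, hn]
      have hsc : (fsStepS S n).1 = S.1 + (fsConsecOf S n + 1) * 10 := by
        have : (fsStepS S n).1 = S.1 + (fsStepS S n).2.1 * 10 := rfl
        rw [this, hconsec]
      have hco : fsConsecOf (fsStepS S n) (n + 1) = fsConsecOf S n + 1 := by
        rw [← hconsec]
        have : (fsStepS S n).2.2 = some n := rfl
        simp [fsConsecOf, this]
      have hstA : fsStepA p (pi, S.1 + fsBonus hits, fsConsecOf S n) (n, c)
          = (pi + 1, S.1 + fsBonus hits + (fsConsecOf S n + 1) * 10 + (if n = 0 then 50 else 0),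
              fsConsecOf S n + 1) := by
        simp [fsStepA, hm]
      have hstC : fsStepC p (pi, hits) (n, c) = (pi + 1, hits ++ [n]) := by
        simp [fsStepC, hm]
      rw [hstA, hstC]
      have hlt' : ∀ x ∈ hits ++ [n], x < n + 1 := by
        intro x hx
        rcases List.mem_append.1 hx with h | h
        · have := hlt x h; omega
        · simp at h; omega
      have := ih (n + 1) (pi + 1) (hits ++ [n]) hlt'
      rw [hS', hsc, hco, hbonus] at this
      convert this using 4 <;> (try simp only [Prod.mk.injEq, true_and, and_true]) <;> ring_nf
    · -- no match
      have hco0 : fsConsecOf S (n + 1) = 0 := by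
        simp only [fsConsecOf]
        cases hp : S.2.2 with
        | none => rfl
        | some q =>
          have hprev := fsStepS_prev hits ((0 : Int), (0 : Int), (none : Option Int))
          rw [← hS, hp] at hprev
          have hqmem : q ∈ hits := by
            cases hg : hits.getLast? with
            | none => simp [hg] at hprev
            | some r =>
              rw [hg] at hprev; simp at hprev
              rw [← hprev] at hg
              exact List.mem_of_getLast? hg
          have := hlt q hqmem
          have : ¬ q + 1 = n + 1 := by omega
          simp [this]
      have hstA : fsStepA p (pi, S.1 + fsBonus hits, fsConsecOf S n) (n, c)
          = (pi, S.1 + fsBonus hits, 0) := by simp [fsStepA, hm]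
      have hstC : fsStepC p (pi, hits) (n, c) = (pi, hits) := by simp [fsStepC, hm]
      rw [hstA, hstC]
      have hlt' : ∀ x ∈ hits, x < n + 1 := fun x hx => by have := hlt x hx; omega
      have := ih (n + 1) pi hits hlt'
      rw [hco0] at this
      exact this

-- ===== VERDICT (by name: the statement is the Claim_ definition above) =====
theorem fuzzy_score_py_spec : Claim_equal_fuzzy_score_py := by
  intro pattern text _
  unfold Spec_fuzzy_score_py fuzzy_score_py fuzzy_score_py_alt
  have h := fs_main pattern.toList text.toList 0 0 [] (by simp)
  simp only [List.foldl_nil, fsBonus, fsConsecOf, List.not_mem_nil, if_false,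
    add_zero] at h
  obtain ⟨h1, h2⟩ := h
  by_cases hp : pattern.toList = []
  · simp [hp]
  · simp only [hp, if_false]
    rw [h1, h2]
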